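-- pv_equiv track=rewrite | github.com/synalysis/elm-pebble | scripts/real_world_elm_runner.py | choose_main_module
-- ===== SOURCE A (Python) =====
-- from typing import Any, Dict, List, Optional, Sequence, Set, Tuple
--
-- def choose_main_module(docs_json: Any) -> Optional[str]:
--     if not isinstance(docs_json, list):
--         return None
--     names = [x.get("name") for x in docs_json if isinstance(x, dict) and isinstance(x.get("name"), str)]
--     if not names:
--         return None
--     if "Main" in names:
--         return "Main"
--     return sorted(names)[0]
-- ===== SOURCE B (Python) =====
-- def choose_main_module(docs_json):
--     if not isinstance(docs_json, list):
--         return None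
--     best = None
--     for x in docs_json:
--         if not isinstance(x, dict):
--             continue
--         name = x.get("name")
--         if not isinstance(name, str):
--             continue
--         if name == "Main":
--             return "Main"
--         if best is None or name < best:
--             best = name
--     return best
-- ===== Notes on version B (the rewrite author's own statement) =====
-- stated objective: alternative
-- what changed: Replaces A's build-filtered-list + membership test + sorted()[0] with a single pass that returns 'Main' immediately and otherwise tracks the lexicographically smallest name in one accumulator, never materialising the list or sorting.
import Mathlib
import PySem

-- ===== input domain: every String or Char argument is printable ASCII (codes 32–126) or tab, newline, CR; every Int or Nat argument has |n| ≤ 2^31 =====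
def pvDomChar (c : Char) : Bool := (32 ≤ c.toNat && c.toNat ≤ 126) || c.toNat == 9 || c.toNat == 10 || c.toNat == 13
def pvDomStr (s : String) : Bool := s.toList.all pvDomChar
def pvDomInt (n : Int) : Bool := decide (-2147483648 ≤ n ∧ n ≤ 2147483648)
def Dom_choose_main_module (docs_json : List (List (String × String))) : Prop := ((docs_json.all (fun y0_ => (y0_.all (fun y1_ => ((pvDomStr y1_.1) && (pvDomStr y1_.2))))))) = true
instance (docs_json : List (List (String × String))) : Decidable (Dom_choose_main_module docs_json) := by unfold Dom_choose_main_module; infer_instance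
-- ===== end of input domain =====

-- ===== PORT A =====
-- A: collect the "name" values (first-match dict lookup), return none if empty,
-- "Main" if present, else sorted(names)[0].
def choose_main_module (docs_json : List (List (String × String))) : Option String :=
  let names := docs_json.filterMap (fun x => x.lookup "name")
  if names = [] then none
  else if "Main" ∈ names then some "Main"
  else (PySem.List.sorted names (fun s => s) false).head?

-- ===== PORT B =====
-- B: single pass; early return on "Main", otherwise keep the smallest name seen.
def chooseMainLoop : List (List (String × String)) → Option String → Option String
  | [], best => best
  | x :: rest, best =>
    match x.lookup "name" with
    | none => chooseMainLoop rest best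
    | some name =>
      if name = "Main" then some "Main"
      else
        match best with
        | none => chooseMainLoop rest (some name)
        | some b => if name < b then chooseMainLoop rest (some name) else chooseMainLoop rest (some b)

def choose_main_module_alt (docs_json : List (List (String × String))) : Option String :=
  chooseMainLoop docs_json none

-- ===== PRECONDITION & SPEC =====
def Spec_choose_main_module (docs_json : List (List (String × String))) (out : Option String) : Prop := out = choose_main_module_alt docs_json
instance (docs_json : List (List (String × String))) (out : Option String) : Decidable (Spec_choose_main_module docs_json out) := by unfold Spec_choose_main_module; infer_instance

-- ===== CLAIM (what is proved, stated in full; the proofs are below) =====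
def Claim_equal_choose_main_module : Prop := ∀ (docs_json : List (List (String × String))), Dom_choose_main_module docs_json → Spec_choose_main_module docs_json (choose_main_module docs_json)

-- ===== LEMMAS AND PROOFS =====

-- B's loop over the whole list, characterised by the extracted name list.
theorem chooseMainLoop_spec (l : List (List (String × String))) :
    ∀ best : Option String,
      chooseMainLoop l best =
        (if "Main" ∈ l.filterMap (fun x => x.lookup "name") then some "Main"
         else (l.filterMap (fun x => x.lookup "name")).foldl
                (fun b n => some (match b with | none => n | some b' => min b' n)) best) := by
  induction l with
  | nil => intro best; simp [chooseMainLoop]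
  | cons x rest ih =>
    intro best
    cases hx : x.lookup "name" with
    | none => simp [chooseMainLoop, hx, ih]
    | some name =>
      by_cases hm : name = "Main"
      · simp [chooseMainLoop, hx, hm]
      · have hm' : ¬ ("Main" = name) := fun h => hm h.symm
        cases best with
        | none => simp [chooseMainLoop, hx, hm, hm', ih]
        | some b =>
          by_cases hlt : name < b
          · simp [chooseMainLoop, hx, hm, hm', hlt, ih, min_comm b name, min_eq_left (le_of_lt hlt)]
          · simp [chooseMainLoop, hx, hm, hm', hlt, ih, min_eq_left (not_lt.mp hlt)]

-- the min-accumulating fold on a nonempty list is fold min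
theorem foldl_omin (t : List String) (b : String) :
    t.foldl (fun b n => some (match b with | none => n | some b' => min b' n)) (some b)
      = some (t.foldl min b) := by
  induction t generalizing b with
  | nil => rfl
  | cons n t ih => simpa using ih (min b n)

-- the head of sorted(xs) is min(xs) (matching A's sorted()[0] against B's running min)
theorem head_sorted_eq_min (x : String) (t : List String) :
    (PySem.List.sorted (x :: t) (fun s => s) false).head? = some (t.foldl min x) := by
  cases hs : PySem.List.sorted (x :: t) (fun s => s) false with
  | nil => exact absurd ((PySem.List.sorted_eq_nil_iff _ _ _).mp hs) (by simp)
  | cons m s =>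
    have hperm := PySem.List.sorted_perm (x :: t) (fun s => s) false
    rw [hs] at hperm
    have hmem : m ∈ x :: t := hperm.mem_iff.mp (by simp)
    have hle : ∀ y ∈ x :: t, m ≤ y := PySem.List.key_head_sorted_le _ _ hs
    have hmin := PySem.List.min?_id_cons x t
    have hmem' : t.foldl min x ∈ x :: t := by
      rcases PySem.List.foldl_min_mem t x with h | h
      · simp [h]
      · simp [h]
    have hle' := PySem.List.min?_isMin hmin
    have : m = t.foldl min x := le_antisymm (hle _ hmem') (hle' m hmem)
    simp [this]

-- ===== VERDICT (by name: the statement is the Claim_ definition above) =====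
theorem choose_main_module_spec : Claim_equal_choose_main_module := by
  intro docs _
  unfold Spec_choose_main_module choose_main_module choose_main_module_alt
  rw [chooseMainLoop_spec]
  cases hn : docs.filterMap (fun x => x.lookup "name") with
  | nil => simp
  | cons x t =>
    by_cases hm : "Main" ∈ x :: t
    · simp [hm]
    · simp [hm, foldl_omin, head_sorted_eq_min]
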